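-- pv_equiv track=rewrite | github.com/gregoryann/Python-Beginner-Examples | Edabit +1500 Python Challenges/Easy/Toy Car Workshop.py | cars
-- ===== SOURCE A (Python) =====
-- def cars(wheels, bodies, figures):
--     totalcars = 0
--     check = True
--     while check:
--         if wheels >= 4 and bodies >= 1 and figures >= 2:
--             wheels -= 4
--             bodies -= 1
--             figures -= 2
--             totalcars += 1
--         else:
--             check = False
--     return totalcars
-- ===== SOURCE B (Python) =====
-- def cars(wheels, bodies, figures):
--     return max(0, min(wheels // 4, bodies, figures // 2))
-- ===== Notes on version B (the rewrite author's own statement) =====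
-- stated objective: simpler
-- what changed: Replaced the decrementing while-loop with the closed-form count max(0, min(wheels // 4, bodies, figures // 2)).
import Mathlib
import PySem

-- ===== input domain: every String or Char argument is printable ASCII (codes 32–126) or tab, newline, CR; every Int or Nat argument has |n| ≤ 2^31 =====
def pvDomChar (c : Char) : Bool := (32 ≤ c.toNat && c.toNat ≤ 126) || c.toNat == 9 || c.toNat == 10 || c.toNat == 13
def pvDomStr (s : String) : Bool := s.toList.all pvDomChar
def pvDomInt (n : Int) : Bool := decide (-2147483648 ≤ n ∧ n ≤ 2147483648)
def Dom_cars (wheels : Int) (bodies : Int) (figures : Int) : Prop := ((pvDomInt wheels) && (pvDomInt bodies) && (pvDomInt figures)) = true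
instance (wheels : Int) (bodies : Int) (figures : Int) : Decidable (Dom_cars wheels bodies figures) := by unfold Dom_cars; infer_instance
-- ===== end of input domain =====

-- B replaces the decrementing while-loop by the closed-form count (simpler, O(1))

-- ===== PORT A =====
-- loop state: (wheels, bodies, figures, totalcars); the while-loop terminates since wheels decreases
def carsLoop (wheels : Int) (bodies : Int) (figures : Int) (totalcars : Int) : Int :=
  if wheels ≥ 4 ∧ bodies ≥ 1 ∧ figures ≥ 2 then
    carsLoop (wheels - 4) (bodies - 1) (figures - 2) (totalcars + 1)
  else totalcars
termination_by wheels.toNat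
decreasing_by omega

def cars (wheels : Int) (bodies : Int) (figures : Int) : Int :=
  carsLoop wheels bodies figures 0

-- ===== PORT B =====
-- B: closed form, clamped at 0
def cars_alt (wheels : Int) (bodies : Int) (figures : Int) : Int :=
  max 0 (min (PySem.Int.floordiv wheels 4) (min bodies (PySem.Int.floordiv figures 2)))

-- ===== PRECONDITION & SPEC =====
def Spec_cars (wheels : Int) (bodies : Int) (figures : Int) (out : Int) : Prop := out = cars_alt wheels bodies figures
instance (wheels : Int) (bodies : Int) (figures : Int) (out : Int) : Decidable (Spec_cars wheels bodies figures out) := by unfold Spec_cars; infer_instance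

-- ===== CLAIM (what is proved, stated in full; the proofs are below) =====
def Claim_equal_cars : Prop := ∀ (wheels : Int) (bodies : Int) (figures : Int), Dom_cars wheels bodies figures → Spec_cars wheels bodies figures (cars wheels bodies figures)

-- ===== LEMMAS AND PROOFS =====

-- ===== VERDICT (by name: the statement is the Claim_ definition above) =====
theorem carsLoop_closed (wheels bodies figures totalcars : Int) :
    carsLoop wheels bodies figures totalcars =
      totalcars + max 0 (min (PySem.Int.floordiv wheels 4) (min bodies (PySem.Int.floordiv figures 2))) := by
  induction wheels, bodies, figures, totalcars using carsLoop.induct with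
  | case1 w b f t h ih =>
    rw [carsLoop, if_pos h, ih,
        PySem.Int.floordiv_eq_ediv_of_pos (a := w - 4) (by omega),
        PySem.Int.floordiv_eq_ediv_of_pos (a := f - 2) (by omega),
        PySem.Int.floordiv_eq_ediv_of_pos (a := w) (by omega),
        PySem.Int.floordiv_eq_ediv_of_pos (a := f) (by omega)]
    omega
  | case2 w b f t h =>
    rw [carsLoop, if_neg h,
        PySem.Int.floordiv_eq_ediv_of_pos (a := w) (by omega),
        PySem.Int.floordiv_eq_ediv_of_pos (a := f) (by omega)]
    omega

theorem cars_spec : Claim_equal_cars := by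
  intro wheels bodies figures _
  show cars wheels bodies figures = cars_alt wheels bodies figures
  rw [cars, cars_alt, carsLoop_closed]
  omega
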